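-- pv_equiv track=rewrite | github.com/rhoitjadhav/competitive-programming-practice | cses.fi/archive/Permutations.py | solve
-- ===== SOURCE A (Python) =====
-- def solve(*args):
--     n = args[0]
--
--     if n <= 1:
--         return n
--
--     if n <= 3:
--         return 'NO SOLUTION'
--
--     result = []
--
--     for i in range(2, n+1, 2):
--         result.append(str(i))
--
--     for i in range(1, n+1, 2):
--         result.append(str(i))
--
--     return " ".join(result)
-- ===== SOURCE B (Python) =====
-- def solve(*args):
--     n = args[0]
--
--     if n <= 1:
--         return n
--
--     if n <= 3:
--         return 'NO SOLUTION'
--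
--     # stable sort by parity: evens (key 0) first in ascending order, then odds
--     return " ".join(map(str, sorted(range(1, n + 1), key=lambda x: x % 2)))
-- ===== Notes on version B (the rewrite author's own statement) =====
-- stated objective: alternative
-- what changed: The two explicit even/odd emission loops are replaced by a single stable sort of range(1, n+1) keyed on parity, which yields the identical evens-then-odds sequence.
-- outside the precondition, e.g. on solve(1): A returns 1, B returns 1; on solve(0): A returns 0, B returns 0
import Mathlib
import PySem

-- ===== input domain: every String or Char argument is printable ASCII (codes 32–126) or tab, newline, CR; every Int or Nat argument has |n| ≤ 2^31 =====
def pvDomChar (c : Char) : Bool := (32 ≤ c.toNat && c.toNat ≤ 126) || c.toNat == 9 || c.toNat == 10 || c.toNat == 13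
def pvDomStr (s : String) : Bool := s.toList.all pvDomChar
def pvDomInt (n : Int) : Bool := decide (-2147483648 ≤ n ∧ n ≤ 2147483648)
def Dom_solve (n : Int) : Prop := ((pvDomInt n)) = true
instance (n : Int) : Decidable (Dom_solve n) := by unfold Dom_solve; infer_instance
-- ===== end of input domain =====

-- B replaces the two even/odd emission loops by one stable sort of range(1, n+1) keyed on parity (alternative decomposition, same result).

-- ===== PORT A =====
def solve (n : Int) : String :=
  if n ≤ 1 then PySem.Int.toStr n  -- outside Pre_solve: the Python returns the integer n here
  else if n ≤ 3 then "NO SOLUTION"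
  else
    let result : List String := []
    let result := (PySem.List.pyRange 2 (n+1) 2).foldl (fun acc i => acc ++ [PySem.Int.toStr i]) result
    let result := (PySem.List.pyRange 1 (n+1) 2).foldl (fun acc i => acc ++ [PySem.Int.toStr i]) result
    PySem.Str.join " " result

-- ===== PORT B =====
def solve_alt (n : Int) : String :=
  if n ≤ 1 then PySem.Int.toStr n  -- outside Pre_solve: the Python returns the integer n here
  else if n ≤ 3 then "NO SOLUTION"
  else
    PySem.Str.join " "
      ((PySem.List.sorted (PySem.List.pyRange 1 (n+1) 1) (fun x => PySem.Int.mod x 2)).map PySem.Int.toStr)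

-- ===== PRECONDITION & SPEC =====
-- Pre_ excludes n ≤ 1, where A returns the INTEGER n itself — not a value of the declared string type.
def Pre_solve (n : Int) : Prop := 2 ≤ n
instance (n : Int) : Decidable (Pre_solve n) := by unfold Pre_solve; infer_instance
def pvWitness_solve : Int := 6
def Spec_solve (n : Int) (out : String) : Prop := out = solve_alt n
instance (n : Int) (out : String) : Decidable (Spec_solve n out) := by unfold Spec_solve; infer_instance

-- ===== CLAIM (what is proved, stated in full; the proofs are below) =====
def Claim_equal_solve : Prop := ∀ (n : Int), Dom_solve n → Pre_solve n → Spec_solve n (solve n)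

-- ===== LEMMAS AND PROOFS =====

-- proof-side abbreviations for the even/odd blocks
def pvEV (e : Nat) : List Int := (List.range e).map (fun k : Nat => (2 : Int) + 2 * (k : Int))
def pvOD (o : Nat) : List Int := (List.range o).map (fun k : Nat => (1 : Int) + 2 * (k : Int))

lemma pvEV_mod {x : Int} {e : Nat} (hx : x ∈ pvEV e) : x % 2 = 0 := by
  simp only [pvEV, List.mem_map] at hx
  obtain ⟨k, -, rfl⟩ := hx
  omega

lemma pvOD_mod {x : Int} {o : Nat} (hx : x ∈ pvOD o) : x % 2 = 1 := by
  simp only [pvOD, List.mem_map] at hx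
  obtain ⟨k, -, rfl⟩ := hx
  omega

lemma pvEV_succ (j : Nat) : pvEV (j + 1) = pvEV j ++ [(2 : Int) + 2 * (j : Int)] := by
  simp [pvEV, List.range_succ]

lemma pvOD_succ (j : Nat) : pvOD (j + 1) = pvOD j ++ [(1 : Int) + 2 * (j : Int)] := by
  simp [pvOD, List.range_succ]

lemma pv_evens_eq (m : Nat) : PySem.List.pyRange 2 ((m : Int) + 1) 2 = pvEV (m / 2) := by
  rw [PySem.List.pyRange_of_pos _ _ (by norm_num : (0:Int) < 2)]
  have hc : (if (2:Int) < (m:Int)+1 then (((m:Int)+1-2+2-1)/2).toNat else 0) = m/2 := by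
    split_ifs with h <;> omega
  rw [hc]; rfl

lemma pv_odds_eq (m : Nat) : PySem.List.pyRange 1 ((m : Int) + 1) 2 = pvOD ((m + 1) / 2) := by
  rw [PySem.List.pyRange_of_pos _ _ (by norm_num : (0:Int) < 2)]
  have hc : (if (1:Int) < (m:Int)+1 then (((m:Int)+1-1+2-1)/2).toNat else 0) = (m+1)/2 := by
    split_ifs with h <;> omega
  rw [hc]; rfl

lemma pv_insertBy_prefix {α : Type} (before : α → α → Bool) (x : α) (as bs : List α)
    (h : ∀ a ∈ as, before x a = false) :
    PySem.List.insertBy before x (as ++ bs) = as ++ PySem.List.insertBy before x bs := by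
  induction as with
  | nil => rfl
  | cons a t ih =>
    simp only [List.cons_append, PySem.List.insertBy, h a (by simp)]
    simp only [Bool.false_eq_true, if_false, List.cons.injEq, true_and]
    exact ih (fun a ha => h a (by simp [ha]))

lemma pv_insertBy_all {α : Type} (before : α → α → Bool) (x : α) (bs : List α)
    (h : ∀ b ∈ bs, before x b = true) :
    PySem.List.insertBy before x bs = x :: bs := by
  cases bs with
  | nil => rfl
  | cons b t => simp [PySem.List.insertBy, h b (by simp)]

-- the heart: the parity-keyed stable sort of [1..m] is evens then odds
lemma pv_sorted_parity (m : Nat) :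
    PySem.List.sorted (PySem.List.pyRange 1 ((m : Int) + 1) 1) (fun x => PySem.Int.mod x 2)
      = pvEV (m / 2) ++ pvOD ((m + 1) / 2) := by
  induction m with
  | zero =>
    rw [PySem.List.sorted_eq_foldl_insertBy, PySem.List.pyRange_one_eq_nil (by norm_num)]
    rfl
  | succ m ih =>
    rw [PySem.List.sorted_eq_foldl_insertBy] at ih ⊢
    have hsplit : PySem.List.pyRange 1 (((m + 1 : Nat) : Int) + 1) 1
        = PySem.List.pyRange 1 ((m : Int) + 1) 1 ++ [(m : Int) + 1] := by
      have h1m : (1 : Int) ≤ (m : Int) + 1 := by omega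
      have h := PySem.List.pyRange_one_succ_right h1m
      push_cast
      exact h
    rw [hsplit, List.foldl_append, ih]
    simp only [List.foldl_cons, List.foldl_nil]
    rcases Nat.even_or_odd m with he | ho
    · -- m even: the new element m+1 is odd and goes to the very end
      have hm2 : m % 2 = 0 := Nat.even_iff.mp he
      have hb : ∀ y ∈ pvEV (m / 2) ++ pvOD ((m + 1) / 2),
          (fun a b => decide (PySem.Int.mod a 2 < PySem.Int.mod b 2)) ((m : Int) + 1) y
            = false := by
        intro y hy
        rcases List.mem_append.mp hy with h | h
        · have hy2 := pvEV_mod h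
          simp only [PySem.Int.mod, Int.fmod_eq_emod, decide_eq_false_iff_not, not_lt]
          omega
        · have hy2 := pvOD_mod h
          simp only [PySem.Int.mod, Int.fmod_eq_emod, decide_eq_false_iff_not, not_lt]
          omega
      rw [PySem.List.insertBy_of_forall_not_before _ _ _ hb]
      have h1 : (m + 1) / 2 = m / 2 := by omega
      have h2 : (m + 1 + 1) / 2 = m / 2 + 1 := by omega
      rw [h1, h2, pvOD_succ, List.append_assoc]
      have : (1 : Int) + 2 * ((m / 2 : Nat) : Int) = (m : Int) + 1 := by omega
      rw [this]
    · -- m odd: the new element m+1 is even and goes right after the evens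
      have hm2 : m % 2 = 1 := Nat.odd_iff.mp ho
      have hpre : ∀ a ∈ pvEV (m / 2),
          (fun a b => decide (PySem.Int.mod a 2 < PySem.Int.mod b 2)) ((m : Int) + 1) a
            = false := by
        intro a ha
        have ha2 := pvEV_mod ha
        simp only [PySem.Int.mod, Int.fmod_eq_emod, decide_eq_false_iff_not, not_lt]
        omega
      have hall : ∀ b ∈ pvOD ((m + 1) / 2),
          (fun a b => decide (PySem.Int.mod a 2 < PySem.Int.mod b 2)) ((m : Int) + 1) b
            = true := by
        intro b hb
        have hb2 := pvOD_mod hb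
        simp only [PySem.Int.mod, Int.fmod_eq_emod, decide_eq_true_eq]
        omega
      rw [pv_insertBy_prefix _ _ _ _ hpre, pv_insertBy_all _ _ _ hall]
      have h1 : (m + 1) / 2 = m / 2 + 1 := by omega
      have h2 : (m + 1 + 1) / 2 = (m + 1) / 2 := by omega
      rw [h2, h1, pvEV_succ, List.append_assoc]
      have : (2 : Int) + 2 * ((m / 2 : Nat) : Int) = (m : Int) + 1 := by omega
      rw [this]
      rfl

lemma pv_foldl_append {α β : Type} (f : α → β) (xs : List α) (init : List β) :
    xs.foldl (fun acc i => acc ++ [f i]) init = init ++ xs.map f := by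
  induction xs generalizing init with
  | nil => simp
  | cons x t ih => simp [List.foldl_cons, ih]

-- ===== VERDICT (by name: the statement is the Claim_ definition above) =====
theorem solve_spec : Claim_equal_solve := by
  intro n _ hpre
  unfold Spec_solve solve solve_alt
  have h1 : ¬ n ≤ 1 := by unfold Pre_solve at hpre; omega
  rw [if_neg h1, if_neg h1]
  by_cases h3 : n ≤ 3
  · rw [if_pos h3, if_pos h3]
  · rw [if_neg h3, if_neg h3]
    have h0 : 0 ≤ n := by omega
    lift n to Nat using h0 with m
    rw [pv_sorted_parity m, pv_evens_eq m, pv_odds_eq m,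
        pv_foldl_append, pv_foldl_append]
    simp
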